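-- pv_equiv track=rewrite | github.com/wzyabcas/InterAct | process/process_arctic.py | choose_best_cut
-- ===== SOURCE A (Python) =====
-- from typing import Dict, List, Optional, Sequence, Tuple
--
-- def choose_best_cut(
--     start_frame: int,
--     candidate_cuts: Sequence[int],
--     min_len: int,
--     max_len: int,
--     target_len: int,
-- ) -> int:
--     valid: List[int] = []
--     for cut in candidate_cuts:
--         seg_len = cut - start_frame + 1
--         if min_len <= seg_len <= max_len:
--             valid.append(cut)
--     if not valid:
--         return -1
--     return min(valid, key=lambda c: (abs((c - start_frame + 1) - target_len), c))
-- ===== SOURCE B (Python) =====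
-- def choose_best_cut(
--     start_frame,
--     candidate_cuts,
--     min_len,
--     max_len,
--     target_len,
-- ):
--     # A cut is valid iff it lies in [lo, hi]; its key |seg_len - target_len|
--     # equals its distance to the ideal cut.  The minimum under
--     # (distance, cut) is therefore either the largest valid cut <= ideal
--     # (ties on distance prefer the smaller cut, i.e. this side) or the
--     # smallest valid cut > ideal -- no key comparison needed.
--     lo = start_frame + min_len - 1
--     hi = start_frame + max_len - 1
--     ideal = start_frame + target_len - 1
--     below = None  # largest valid cut <= ideal
--     above = None  # smallest valid cut > ideal
--     for cut in candidate_cuts: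
--         if lo <= cut <= hi:
--             if cut <= ideal:
--                 if below is None or cut > below:
--                     below = cut
--             else:
--                 if above is None or cut < above:
--                     above = cut
--     if below is None and above is None:
--         return -1
--     if above is None:
--         return below
--     if below is None:
--         return above
--     return below if ideal - below <= above - ideal else above
-- ===== Notes on version B (the rewrite author's own statement) =====
-- stated objective: alternative
-- what changed: Replaces filter-then-min(key=(abs_diff, cut)) with interval arithmetic around the ideal cut start_frame+target_len-1: one pass keeps only the largest valid cut at or below the ideal and the smallest valid cut above it, and an O(1) distance comparison (ties to the lower side) picks the answer, eliminating the key-based minimisation entirely.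
import Mathlib
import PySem

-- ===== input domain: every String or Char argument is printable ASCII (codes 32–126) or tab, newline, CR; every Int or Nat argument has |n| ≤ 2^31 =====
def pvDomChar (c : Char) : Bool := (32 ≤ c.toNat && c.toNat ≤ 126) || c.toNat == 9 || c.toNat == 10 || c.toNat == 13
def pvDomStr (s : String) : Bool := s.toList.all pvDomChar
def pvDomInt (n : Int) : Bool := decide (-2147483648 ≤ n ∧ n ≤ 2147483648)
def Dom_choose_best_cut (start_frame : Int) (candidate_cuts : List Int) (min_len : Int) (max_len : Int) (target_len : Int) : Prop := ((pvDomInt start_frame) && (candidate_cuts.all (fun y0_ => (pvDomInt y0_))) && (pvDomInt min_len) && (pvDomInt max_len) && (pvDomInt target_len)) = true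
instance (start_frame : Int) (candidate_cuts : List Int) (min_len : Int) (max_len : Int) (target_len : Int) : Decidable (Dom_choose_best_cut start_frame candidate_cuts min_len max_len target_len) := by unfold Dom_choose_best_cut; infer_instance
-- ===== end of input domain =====

-- B replaces A's filter-then-min(key) structure by interval arithmetic around the ideal cut:
-- it tracks only the nearest valid cut on each side of the ideal and compares the two distances (alternative; same cost).

-- ===== PORT A =====
-- the body of A's for-loop: append cut to valid when its segment length is in range
def pvValidStep (start_frame min_len max_len : Int) (acc : List Int) (cut : Int) : List Int :=
  let seg_len := cut - start_frame + 1
  if min_len ≤ seg_len ∧ seg_len ≤ max_len then acc ++ [cut] else acc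

def choose_best_cut (start_frame : Int) (candidate_cuts : List Int) (min_len : Int) (max_len : Int) (target_len : Int) : Int :=
  let valid := candidate_cuts.foldl (pvValidStep start_frame min_len max_len) []
  if valid = [] then -1
  else
    match PySem.List.min2? valid (fun c => |(c - start_frame + 1) - target_len|) (fun c => c) with
    | some m => m
    | none => -1

-- ===== PORT B =====
-- B's loop body: update (below, above) = (largest valid cut ≤ ideal, smallest valid cut > ideal)
def pvPairStep (ideal : Int) (s : Option Int × Option Int) (cut : Int) : Option Int × Option Int :=
  if cut ≤ ideal then
    match s.1 with
    | none => (some cut, s.2)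
    | some b => (if b < cut then some cut else some b, s.2)
  else
    match s.2 with
    | none => (s.1, some cut)
    | some a => (s.1, if cut < a then some cut else some a)

-- B's final O(1) comparison of the two sides
def pvFinish (ideal : Int) : Option Int × Option Int → Int
  | (none, none) => -1
  | (some b, none) => b
  | (none, some a) => a
  | (some b, some a) => if ideal - b ≤ a - ideal then b else a

def choose_best_cut_alt (start_frame : Int) (candidate_cuts : List Int) (min_len : Int) (max_len : Int) (target_len : Int) : Int :=
  let lo := start_frame + min_len - 1
  let hi := start_frame + max_len - 1
  let ideal := start_frame + target_len - 1
  let s := candidate_cuts.foldl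
    (fun s cut => if lo ≤ cut ∧ cut ≤ hi then pvPairStep ideal s cut else s) (none, none)
  pvFinish ideal s

-- ===== PRECONDITION & SPEC =====
def Spec_choose_best_cut (start_frame : Int) (candidate_cuts : List Int) (min_len : Int) (max_len : Int) (target_len : Int) (out : Int) : Prop := out = choose_best_cut_alt start_frame candidate_cuts min_len max_len target_len
instance (start_frame : Int) (candidate_cuts : List Int) (min_len : Int) (max_len : Int) (target_len : Int) (out : Int) : Decidable (Spec_choose_best_cut start_frame candidate_cuts min_len max_len target_len out) := by unfold Spec_choose_best_cut; infer_instance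

-- ===== CLAIM (what is proved, stated in full; the proofs are below) =====
def Claim_equal_choose_best_cut : Prop := ∀ (start_frame : Int) (candidate_cuts : List Int) (min_len : Int) (max_len : Int) (target_len : Int), Dom_choose_best_cut start_frame candidate_cuts min_len max_len target_len → Spec_choose_best_cut start_frame candidate_cuts min_len max_len target_len (choose_best_cut start_frame candidate_cuts min_len max_len target_len)

-- ===== LEMMAS AND PROOFS =====

-- the step hidden inside PySem.List.min2? for A's key
def pvStepMin (start_frame target_len : Int) (acc : Option Int) (x : Int) : Option Int :=
  match acc with
  | none => some x
  | some m =>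
    if (decide (|(x - start_frame + 1) - target_len| < |(m - start_frame + 1) - target_len|)
        || (!decide (|(m - start_frame + 1) - target_len| < |(x - start_frame + 1) - target_len|)
            && decide ((fun c : Int => c) x < (fun c : Int => c) m))) = true then some x else some m

lemma min2?_eq_foldl (start_frame target_len : Int) (l : List Int) :
    PySem.List.min2? l (fun c => |(c - start_frame + 1) - target_len|) (fun c => c)
      = l.foldl (pvStepMin start_frame target_len) none := by
  simp only [PySem.List.min2?]
  apply List.foldl_ext
  intro a x _
  cases a <;> rfl

-- the invariant carried by B's pair state
def pvInv (ideal : Int) (s : Option Int × Option Int) : Prop :=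
  (∀ b, s.1 = some b → b ≤ ideal) ∧ (∀ a, s.2 = some a → ideal < a)

-- optional version of pvFinish (none on the empty state)
def pvOptFinish (ideal : Int) : Option Int × Option Int → Option Int
  | (none, none) => none
  | (some b, none) => some b
  | (none, some a) => some a
  | (some b, some a) => some (if ideal - b ≤ a - ideal then b else a)

lemma pvAbs (y : Int) : |y| = if 0 ≤ y then y else -y := by
  rcases le_or_gt 0 y with h | h
  · rw [abs_of_nonneg h, if_pos h]
  · rw [abs_of_neg h, if_neg (not_le.mpr h)]

lemma inv_step (ideal x : Int) (s : Option Int × Option Int) (h : pvInv ideal s) :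
    pvInv ideal (pvPairStep ideal s x) := by
  obtain ⟨s1, s2⟩ := s
  obtain ⟨h1, h2⟩ := h
  rcases s1 with _ | b <;> rcases s2 with _ | a <;>
    (try have hb := h1 _ rfl) <;> (try have ha := h2 _ rfl) <;>
    refine ⟨fun v hv => ?_, fun v hv => ?_⟩ <;>
      simp only [pvPairStep] at hv <;>
      split_ifs at hv
  all_goals first
    | omega
    | (simp at hv <;> omega)

-- one step of B's pair tracking commutes with one step of A's key-minimisation
lemma step_comm (start_frame target_len ideal x : Int)
    (hI : ideal = start_frame + target_len - 1)
    (s : Option Int × Option Int) (h : pvInv ideal s) :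
    pvOptFinish ideal (pvPairStep ideal s x)
      = pvStepMin start_frame target_len (pvOptFinish ideal s) x := by
  obtain ⟨s1, s2⟩ := s
  have key : ∀ c : Int, (c - start_frame + 1) - target_len = c - ideal := by
    intro c; omega
  rcases s1 with _ | b <;> rcases s2 with _ | a
  · -- (none, none)
    by_cases hx : x ≤ ideal <;>
      simp [pvPairStep, pvOptFinish, pvStepMin, hx]
  · -- (none, some a)
    have ha := h.2 a rfl
    by_cases hx : x ≤ ideal
    · (simp only [pvPairStep, hx, if_true, if_false, ite_true, ite_false, pvOptFinish, pvStepMin, key, pvAbs, Bool.or_eq_true, Bool.and_eq_true, Bool.not_eq_eq_eq_not, Bool.not_true, decide_eq_true_eq, decide_eq_false_iff_not]; split_ifs <;> first | rfl | omega | (exfalso; omega) | (congr 1; omega))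
    · by_cases hxa : x < a
      · (simp only [pvPairStep, hx, hxa, if_true, if_false, ite_true, ite_false, pvOptFinish, pvStepMin, key, pvAbs, Bool.or_eq_true, Bool.and_eq_true, Bool.not_eq_eq_eq_not, Bool.not_true, decide_eq_true_eq, decide_eq_false_iff_not]; split_ifs <;> first | rfl | omega | (exfalso; omega) | (congr 1; omega))
      · (simp only [pvPairStep, hx, hxa, if_true, if_false, ite_true, ite_false, pvOptFinish, pvStepMin, key, pvAbs, Bool.or_eq_true, Bool.and_eq_true, Bool.not_eq_eq_eq_not, Bool.not_true, decide_eq_true_eq, decide_eq_false_iff_not]; split_ifs <;> first | rfl | omega | (exfalso; omega) | (congr 1; omega))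
  · -- (some b, none)
    have hb := h.1 b rfl
    by_cases hx : x ≤ ideal
    · by_cases hbx : b < x
      · (simp only [pvPairStep, hx, hbx, if_true, if_false, ite_true, ite_false, pvOptFinish, pvStepMin, key, pvAbs, Bool.or_eq_true, Bool.and_eq_true, Bool.not_eq_eq_eq_not, Bool.not_true, decide_eq_true_eq, decide_eq_false_iff_not]; split_ifs <;> first | rfl | omega | (exfalso; omega) | (congr 1; omega))
      · (simp only [pvPairStep, hx, hbx, if_true, if_false, ite_true, ite_false, pvOptFinish, pvStepMin, key, pvAbs, Bool.or_eq_true, Bool.and_eq_true, Bool.not_eq_eq_eq_not, Bool.not_true, decide_eq_true_eq, decide_eq_false_iff_not]; split_ifs <;> first | rfl | omega | (exfalso; omega) | (congr 1; omega))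
    · (simp only [pvPairStep, hx, if_true, if_false, ite_true, ite_false, pvOptFinish, pvStepMin, key, pvAbs, Bool.or_eq_true, Bool.and_eq_true, Bool.not_eq_eq_eq_not, Bool.not_true, decide_eq_true_eq, decide_eq_false_iff_not]; split_ifs <;> first | rfl | omega | (exfalso; omega) | (congr 1; omega))
  · -- (some b, some a)
    have hb := h.1 b rfl
    have ha := h.2 a rfl
    by_cases hx : x ≤ ideal
    · by_cases hbx : b < x
      · (simp only [pvPairStep, hx, hbx, if_true, if_false, ite_true, ite_false, pvOptFinish, pvStepMin, key, pvAbs, Bool.or_eq_true, Bool.and_eq_true, Bool.not_eq_eq_eq_not, Bool.not_true, decide_eq_true_eq, decide_eq_false_iff_not]; split_ifs <;> first | rfl | omega | (exfalso; omega) | (congr 1; omega))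
      · (simp only [pvPairStep, hx, hbx, if_true, if_false, ite_true, ite_false, pvOptFinish, pvStepMin, key, pvAbs, Bool.or_eq_true, Bool.and_eq_true, Bool.not_eq_eq_eq_not, Bool.not_true, decide_eq_true_eq, decide_eq_false_iff_not]; split_ifs <;> first | rfl | omega | (exfalso; omega) | (congr 1; omega))
    · by_cases hxa : x < a
      · (simp only [pvPairStep, hx, hxa, if_true, if_false, ite_true, ite_false, pvOptFinish, pvStepMin, key, pvAbs, Bool.or_eq_true, Bool.and_eq_true, Bool.not_eq_eq_eq_not, Bool.not_true, decide_eq_true_eq, decide_eq_false_iff_not]; split_ifs <;> first | rfl | omega | (exfalso; omega) | (congr 1; omega))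
      · (simp only [pvPairStep, hx, hxa, if_true, if_false, ite_true, ite_false, pvOptFinish, pvStepMin, key, pvAbs, Bool.or_eq_true, Bool.and_eq_true, Bool.not_eq_eq_eq_not, Bool.not_true, decide_eq_true_eq, decide_eq_false_iff_not]; split_ifs <;> first | rfl | omega | (exfalso; omega) | (congr 1; omega))

-- folding B's pair step over a list equals folding A's min step, through pvOptFinish
lemma fold_pair_min (start_frame target_len : Int) (xs : List Int) :
    ∀ s, pvInv (start_frame + target_len - 1) s →
      pvOptFinish (start_frame + target_len - 1)
          (xs.foldl (pvPairStep (start_frame + target_len - 1)) s)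
        = xs.foldl (pvStepMin start_frame target_len)
            (pvOptFinish (start_frame + target_len - 1) s) := by
  induction xs with
  | nil => intro s _; rfl
  | cons x t ih =>
    intro s hs
    rw [List.foldl_cons, List.foldl_cons,
      ← step_comm start_frame target_len _ x rfl s hs, ih _ (inv_step _ x s hs)]

-- fusion: B's guarded pass over the candidates equals B's pair step folded over A's valid list
lemma fusedB (start_frame min_len max_len target_len : Int) (xs : List Int) :
    ∀ (l : List Int) (s : Option Int × Option Int),
      ((xs.foldl (pvValidStep start_frame min_len max_len) l).foldl
          (pvPairStep (start_frame + target_len - 1)) s)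
        = xs.foldl
            (fun s cut =>
              if start_frame + min_len - 1 ≤ cut ∧ cut ≤ start_frame + max_len - 1 then
                pvPairStep (start_frame + target_len - 1) s cut
              else s)
            (l.foldl (pvPairStep (start_frame + target_len - 1)) s) := by
  induction xs with
  | nil => intro l s; rfl
  | cons c t ih =>
    intro l s
    by_cases h : min_len ≤ c - start_frame + 1 ∧ c - start_frame + 1 ≤ max_len
    · have hg : start_frame + min_len - 1 ≤ c ∧ c ≤ start_frame + max_len - 1 := by omega
      have hstep : pvValidStep start_frame min_len max_len l c = l ++ [c] := by
        dsimp only [pvValidStep]; rw [if_pos h]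
      rw [List.foldl_cons, List.foldl_cons, hstep, ih (l ++ [c]) s, List.foldl_append,
        List.foldl_cons, List.foldl_nil, if_pos hg]
    · have hg : ¬ (start_frame + min_len - 1 ≤ c ∧ c ≤ start_frame + max_len - 1) := by omega
      have hstep : pvValidStep start_frame min_len max_len l c = l := by
        dsimp only [pvValidStep]; rw [if_neg h]
      rw [List.foldl_cons, List.foldl_cons, hstep, ih l s, if_neg hg]

-- the min step starting from some is always some
lemma foldl_stepMin_some (start_frame target_len : Int) (l : List Int) (m : Int) :
    ∃ r, l.foldl (pvStepMin start_frame target_len) (some m) = some r := by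
  induction l generalizing m with
  | nil => exact ⟨m, rfl⟩
  | cons c t ih =>
    simp only [List.foldl_cons, pvStepMin]
    split <;> exact ih _

-- pvFinish through pvOptFinish
lemma finish_eq (ideal : Int) (s : Option Int × Option Int) :
    pvFinish ideal s = match pvOptFinish ideal s with | none => -1 | some m => m := by
  obtain ⟨s1, s2⟩ := s; cases s1 <;> cases s2 <;> rfl

theorem choose_best_cut_eq (start_frame : Int) (candidate_cuts : List Int)
    (min_len max_len target_len : Int) :
    choose_best_cut start_frame candidate_cuts min_len max_len target_len
      = choose_best_cut_alt start_frame candidate_cuts min_len max_len target_len := by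
  have hB : choose_best_cut_alt start_frame candidate_cuts min_len max_len target_len
      = pvFinish (start_frame + target_len - 1)
          ((candidate_cuts.foldl (pvValidStep start_frame min_len max_len) []).foldl
            (pvPairStep (start_frame + target_len - 1)) (none, none)) := by
    show pvFinish _ (candidate_cuts.foldl _ (none, none)) = _
    rw [fusedB start_frame min_len max_len target_len candidate_cuts [] (none, none)]
    rfl
  rw [hB, finish_eq,
    fold_pair_min start_frame target_len _ (none, none)
      ⟨(by intro b h; cases h), (by intro a h; cases h)⟩]
  show (if (candidate_cuts.foldl (pvValidStep start_frame min_len max_len) []) = [] then -1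
        else match PySem.List.min2?
            (candidate_cuts.foldl (pvValidStep start_frame min_len max_len) [])
            (fun c => |(c - start_frame + 1) - target_len|) (fun c => c) with
          | some m => m | none => -1) = _
  rw [min2?_eq_foldl]
  cases he : candidate_cuts.foldl (pvValidStep start_frame min_len max_len) [] with
  | nil => rfl
  | cons c t =>
    rw [List.foldl_cons]
    have hfirst : pvStepMin start_frame target_len none c = some c := rfl
    rw [hfirst]
    obtain ⟨r, hr⟩ := foldl_stepMin_some start_frame target_len t c
    rw [hr]
    show r = match List.foldl (pvStepMin start_frame target_len)
        (pvStepMin start_frame target_len none c) t with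
      | none => -1 | some m => m
    rw [hfirst, hr]

-- ===== VERDICT (by name: the statement is the Claim_ definition above) =====
theorem choose_best_cut_spec : Claim_equal_choose_best_cut := by
  intro sf cc mn mx tg _
  unfold Spec_choose_best_cut
  exact choose_best_cut_eq sf cc mn mx tg
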